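-- pv_equiv track=rewrite | github.com/MrBrantCode/unitest_baseline | mut_generate/mist_train_cf/cf_437/solution.py | is_palindrome_list
-- ===== SOURCE A (Python) =====
-- def is_palindrome_list(lst):
--     for string in lst:
--         modified_string = ""
--         for char in string:
--             if char.isalnum():
--                 modified_string += char.lower()
--         if modified_string != modified_string[::-1]:
--             return False
--     return True
-- ===== SOURCE B (Python) =====
-- def is_palindrome_list(lst):
--     for string in lst:
--         cleaned = [c.lower() for c in string if c.isalnum()]
--         i, j = 0, len(cleaned) - 1
--         while i < j:
--             if cleaned[i] != cleaned[j]: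
--                 return False
--             i += 1
--             j -= 1
--     return True
-- ===== Notes on version B (the rewrite author's own statement) =====
-- stated objective: alternative
-- what changed: A builds the cleaned string by repeated concatenation and compares it with a reversed copy; B builds the cleaned character list once and checks palindromicity with an inward two-pointer index loop with early exit, never materializing a reversed copy.
import Mathlib
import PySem

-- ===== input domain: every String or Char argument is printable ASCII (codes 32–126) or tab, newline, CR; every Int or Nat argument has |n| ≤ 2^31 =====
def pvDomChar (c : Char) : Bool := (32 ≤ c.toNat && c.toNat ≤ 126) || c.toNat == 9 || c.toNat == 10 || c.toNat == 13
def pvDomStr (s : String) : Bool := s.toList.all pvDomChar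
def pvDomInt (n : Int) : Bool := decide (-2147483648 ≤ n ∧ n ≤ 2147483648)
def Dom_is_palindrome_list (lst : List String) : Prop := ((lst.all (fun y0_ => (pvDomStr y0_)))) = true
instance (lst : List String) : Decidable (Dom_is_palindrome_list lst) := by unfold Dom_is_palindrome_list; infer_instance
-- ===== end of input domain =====

-- B replaces A's build-reversed-copy-and-compare with a two-pointer inward scan over the cleaned
-- character list (alternative decomposition; return value only, neither mutates its argument).

-- ===== PORT A =====
-- for string in lst: build modified_string char by char, compare with modified_string[::-1]
def is_palindrome_list (lst : List String) : Bool :=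
  match lst with
  | [] => true
  | s :: rest =>
    let m := s.toList.foldl
      (fun acc c => if PySem.Chars.isalnum c then acc ++ [PySem.Chars.lowerChar c] else acc)
      ([] : List Char)
    if m ≠ (PySem.List.slice? m none none (-1)).getD [] then false
    else is_palindrome_list rest

-- ===== PORT B =====
-- while i < j: compare cleaned[i] with cleaned[j], early exit on mismatch (0 ≤ i < j < length, so
-- getD's default is never read — exact for Python's in-range indexing)
def pvTwoPtr (cs : List Char) (i j : Nat) : Bool :=
  if h : i < j then
    if cs.getD i ' ' ≠ cs.getD j ' ' then false
    else pvTwoPtr cs (i + 1) (j - 1)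
  else true
termination_by j - i
decreasing_by omega

def is_palindrome_list_alt (lst : List String) : Bool :=
  match lst with
  | [] => true
  | s :: rest =>
    let cleaned := (s.toList.filter PySem.Chars.isalnum).map PySem.Chars.lowerChar
    if pvTwoPtr cleaned 0 (cleaned.length - 1) then is_palindrome_list_alt rest
    else false

-- ===== PRECONDITION & SPEC =====
def Spec_is_palindrome_list (lst : List String) (out : Bool) : Prop := out = is_palindrome_list_alt lst
instance (lst : List String) (out : Bool) : Decidable (Spec_is_palindrome_list lst out) := by unfold Spec_is_palindrome_list; infer_instance

-- ===== CLAIM (what is proved, stated in full; the proofs are below) =====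
def Claim_equal_is_palindrome_list : Prop := ∀ (lst : List String), Dom_is_palindrome_list lst → Spec_is_palindrome_list lst (is_palindrome_list lst)

-- ===== LEMMAS AND PROOFS =====

theorem pvFoldl_clean (l : List Char) (acc : List Char) :
    l.foldl (fun acc c => if PySem.Chars.isalnum c then acc ++ [PySem.Chars.lowerChar c] else acc) acc
      = acc ++ (l.filter PySem.Chars.isalnum).map PySem.Chars.lowerChar := by
  induction l generalizing acc with
  | nil => simp
  | cons c l ih => by_cases h : PySem.Chars.isalnum c <;> simp [h, ih]

theorem pvTwoPtr_cons (cs : List Char) (x : Char) :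
    ∀ n i j, j - i ≤ n → pvTwoPtr (x :: cs) (i + 1) (j + 1) = pvTwoPtr cs i j := by
  intro n
  induction n with
  | zero =>
    intro i j h
    rw [pvTwoPtr]
    conv_rhs => rw [pvTwoPtr]
    simp [show ¬ i < j by omega, show ¬ i + 1 < j + 1 by omega]
  | succ n ih =>
    intro i j h
    by_cases hij : i < j
    · rw [pvTwoPtr]
      conv_rhs => rw [pvTwoPtr]
      simp only [show i + 1 < j + 1 by omega, hij, dif_pos, List.getD_cons_succ]
      rw [show j + 1 - 1 = (j - 1) + 1 by omega, ih (i + 1) (j - 1) (by omega)]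
    · rw [pvTwoPtr]
      conv_rhs => rw [pvTwoPtr]
      simp [hij, show ¬ i + 1 < j + 1 by omega]

theorem pvTwoPtr_append (cs : List Char) (x : Char) :
    ∀ n i j, j - i ≤ n → j < cs.length → pvTwoPtr (cs ++ [x]) i j = pvTwoPtr cs i j := by
  intro n
  induction n with
  | zero =>
    intro i j h hj
    rw [pvTwoPtr]
    conv_rhs => rw [pvTwoPtr]
    simp [show ¬ i < j by omega]
  | succ n ih =>
    intro i j h hj
    by_cases hij : i < j
    · have hi : i < cs.length := by omega
      rw [pvTwoPtr]
      conv_rhs => rw [pvTwoPtr]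
      simp only [hij, dif_pos, List.getD_append _ _ _ _ hi, List.getD_append _ _ _ _ hj]
      rw [ih (i + 1) (j - 1) (by omega) (by omega)]
    · rw [pvTwoPtr]
      conv_rhs => rw [pvTwoPtr]
      simp [hij]

theorem pvTwoPtr_pal (cs : List Char) :
    pvTwoPtr cs 0 (cs.length - 1) = decide (cs = cs.reverse) := by
  induction cs using List.bidirectionalRec with
  | nil => rw [pvTwoPtr]; simp
  | singleton a => rw [pvTwoPtr]; simp
  | cons_append a l b ih =>
    have hlen : (a :: (l ++ [b])).length - 1 = l.length + 1 := by simp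
    rw [hlen, pvTwoPtr]
    have h0 : (0 : Nat) < l.length + 1 := by omega
    have hga : (a :: (l ++ [b])).getD 0 ' ' = a := rfl
    have hgb : (a :: (l ++ [b])).getD (l.length + 1) ' ' = b := by
      simp [List.getD]
    simp only [h0, dif_pos, hga, hgb]
    by_cases hab : a = b
    · subst hab
      simp only [ne_eq, not_true_eq_false, if_false, Nat.add_sub_cancel]
      have key : (a :: (l ++ [a]) = (a :: (l ++ [a])).reverse) ↔ (l = l.reverse) := by
        simp
      cases l with
      | nil =>
        rw [pvTwoPtr]; simp
      | cons c t =>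
        have h1 : pvTwoPtr (a :: (c :: t ++ [a])) (0 + 1) ((c :: t).length - 1 + 1)
            = pvTwoPtr (c :: t ++ [a]) 0 ((c :: t).length - 1) :=
          pvTwoPtr_cons _ _ _ _ _ (le_refl _)
        have h2 : pvTwoPtr (c :: t ++ [a]) 0 ((c :: t).length - 1)
            = pvTwoPtr (c :: t) 0 ((c :: t).length - 1) :=
          pvTwoPtr_append _ _ _ _ _ (le_refl _) (by simp)
        have hl : (c :: t).length - 1 + 1 = (c :: t).length := by simp
        rw [show (c :: t).length = (c :: t).length - 1 + 1 from hl.symm, h1, h2, ih]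
        rw [decide_eq_decide.mpr key]
    · simp only [ne_eq, hab, not_false_eq_true, if_true]
      symm
      simp only [decide_eq_false_iff_not]
      intro hcontra
      have hh := congrArg List.head? hcontra
      simp at hh
      exact hab hh

-- A's per-string "clean, compare with reversed copy" ite equals B's per-string two-pointer ite
theorem pvStepIte (s : String) (x y : Bool) :
    (let m := s.toList.foldl
        (fun acc c => if PySem.Chars.isalnum c then acc ++ [PySem.Chars.lowerChar c] else acc)
        ([] : List Char)
      if m ≠ (PySem.List.slice? m none none (-1)).getD [] then y else x)
    = (let cleaned := (s.toList.filter PySem.Chars.isalnum).map PySem.Chars.lowerChar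
      if pvTwoPtr cleaned 0 (cleaned.length - 1) then x else y) := by
  simp only [pvFoldl_clean, List.nil_append, PySem.List.slice?_none_none_neg_one,
    Option.getD_some, pvTwoPtr_pal]
  by_cases h : (s.toList.filter PySem.Chars.isalnum).map PySem.Chars.lowerChar
      = ((s.toList.filter PySem.Chars.isalnum).map PySem.Chars.lowerChar).reverse
  · rw [if_neg (not_not_intro h), if_pos (decide_eq_true h)]
  · rw [if_pos h, if_neg (by simp [h])]

-- ===== VERDICT (by name: the statement is the Claim_ definition above) =====
theorem is_palindrome_list_spec : Claim_equal_is_palindrome_list := by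
  intro lst hdom
  unfold Spec_is_palindrome_list
  induction lst with
  | nil => rfl
  | cons s rest ih =>
    have hdr : Dom_is_palindrome_list rest := by
      unfold Dom_is_palindrome_list at hdom ⊢
      simp only [List.all_cons, Bool.and_eq_true] at hdom
      exact hdom.2
    rw [is_palindrome_list, is_palindrome_list_alt, ih hdr]
    exact pvStepIte s (is_palindrome_list_alt rest) false
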